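-- pv_equiv track=rewrite | github.com/Hanliang-David/leetcode | suibi/func_py_generate_doubly_even_magic_square.py | func_py_generate_doubly_even_magic_square
-- ===== SOURCE A (Python) =====
-- def func_py_generate_doubly_even_magic_square(n):
--     magic_square = [[(n * i + j + 1) for j in range(n)] for i in range(n)]
--
--     for i in range(0, n // 4):
--         for j in range(0, n // 4):
--             magic_square[i][j] = n*n + 1 - magic_square[i][j]
--
--     for i in range(0, n // 4):
--         for j in range(3 * n // 4, n):
--             magic_square[i][j] = n*n + 1 - magic_square[i][j]
--
--     for i in range(3 * n // 4, n):
--         for j in range(0, n // 4):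
--             magic_square[i][j] = n*n + 1 - magic_square[i][j]
--
--     for i in range(3 * n // 4, n):
--         for j in range(3 * n // 4, n):
--             magic_square[i][j] = n*n + 1 - magic_square[i][j]
--
--     return magic_square
-- ===== SOURCE B (Python) =====
-- def func_py_generate_doubly_even_magic_square(n):
--     q, t = n // 4, 3 * n // 4
--     rows = []
--     for i in range(n):
--         asc = list(range(n * i + 1, n * i + n + 1))
--         if i < q or i >= t:
--             desc = list(range(n * n - n * i, n * n - n * i - n, -1))
--             rows.append(desc[:q] + asc[q:t] + desc[t:])
--         else:
--             rows.append(asc)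
--     return rows
-- ===== Notes on version B (the rewrite author's own statement) =====
-- stated objective: alternative
-- what changed: B builds each row by slicing and concatenating two precomputed arithmetic ranges (the ascending base run and the descending complement run), so no cell is ever tested or patched individually, replacing A's build-then-overwrite-four-corner-blocks scheme.
import Mathlib
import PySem

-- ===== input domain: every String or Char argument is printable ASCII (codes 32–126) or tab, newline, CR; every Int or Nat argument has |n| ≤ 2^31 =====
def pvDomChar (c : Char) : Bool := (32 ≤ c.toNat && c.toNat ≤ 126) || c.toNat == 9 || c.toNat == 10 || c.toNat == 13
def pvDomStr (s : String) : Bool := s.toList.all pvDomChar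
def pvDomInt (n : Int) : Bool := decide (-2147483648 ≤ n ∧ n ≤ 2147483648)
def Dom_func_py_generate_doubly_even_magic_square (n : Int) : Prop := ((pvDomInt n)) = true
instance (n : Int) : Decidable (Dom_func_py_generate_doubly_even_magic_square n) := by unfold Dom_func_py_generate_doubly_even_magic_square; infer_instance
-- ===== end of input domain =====

-- B assembles each row by slicing and concatenating two precomputed arithmetic runs (the ascending
-- base run and the descending complement run) instead of A's build-then-overwrite-four-corner-blocks
-- scheme (objective: alternative). Return values only.

-- ===== PORT A =====
-- magic_square[i][j] = n*n + 1 - magic_square[i][j]  (indices produced by range are in bounds)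
def pvFlipAt (n : Int) (m : List (List Int)) (i j : Int) : List (List Int) :=
  m.modify i.toNat (fun row => row.modify j.toNat (fun v => n * n + 1 - v))

-- one 'for i in range(a,b): for j in range(c,d): flip' pass
def pvPass (n a b c d : Int) (m : List (List Int)) : List (List Int) :=
  (PySem.List.pyRange a b 1).foldl (fun m i =>
    (PySem.List.pyRange c d 1).foldl (fun m j => pvFlipAt n m i j) m) m

def func_py_generate_doubly_even_magic_square (n : Int) : List (List Int) :=
  let magic_square := (PySem.List.pyRange 0 n 1).map (fun i =>
    (PySem.List.pyRange 0 n 1).map (fun j => n * i + j + 1))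
  let q := PySem.Int.floordiv n 4
  let t := PySem.Int.floordiv (3 * n) 4
  let m1 := pvPass n 0 q 0 q magic_square
  let m2 := pvPass n 0 q t n m1
  let m3 := pvPass n t n 0 q m2
  let m4 := pvPass n t n t n m3
  m4

-- ===== PORT B =====
def func_py_generate_doubly_even_magic_square_alt (n : Int) : List (List Int) :=
  let q := PySem.Int.floordiv n 4
  let t := PySem.Int.floordiv (3 * n) 4
  (PySem.List.pyRange 0 n 1).foldl (fun rows i =>
    let asc := PySem.List.pyRange (n * i + 1) (n * i + n + 1) 1
    rows ++ [if i < q ∨ t ≤ i then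
        let desc := PySem.List.pyRange (n * n - n * i) (n * n - n * i - n) (-1)
        PySem.List.slice desc none (some q) ++ PySem.List.slice asc (some q) (some t) ++
          PySem.List.slice desc (some t) none
      else asc]) []

-- ===== PRECONDITION & SPEC =====
def Spec_func_py_generate_doubly_even_magic_square (n : Int) (out : List (List Int)) : Prop := out = func_py_generate_doubly_even_magic_square_alt n
instance (n : Int) (out : List (List Int)) : Decidable (Spec_func_py_generate_doubly_even_magic_square n out) := by unfold Spec_func_py_generate_doubly_even_magic_square; infer_instance

-- ===== CLAIM (what is proved, stated in full; the proofs are below) =====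
def Claim_equal_func_py_generate_doubly_even_magic_square : Prop := ∀ (n : Int), Dom_func_py_generate_doubly_even_magic_square n → Spec_func_py_generate_doubly_even_magic_square n (func_py_generate_doubly_even_magic_square n)

-- ===== LEMMAS AND PROOFS =====

-- proof-only middle form: the square written cell by cell
def pvComp (n : Int) : List (List Int) :=
  (PySem.List.pyRange 0 n 1).map (fun i =>
    (PySem.List.pyRange 0 n 1).map (fun j =>
      if (i < n / 4 ∨ 3 * n / 4 ≤ i) ∧ (j < n / 4 ∨ 3 * n / 4 ≤ j) then
        n * n + 1 - (n * i + j + 1) else n * i + j + 1))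

-- modify twice at the same index composes
theorem pvModifyModify {α : Type} (m : List α) (i : Nat) (f g : α → α) :
    (m.modify i f).modify i g = m.modify i (fun x => g (f x)) := by
  apply List.ext_getElem?
  intro k
  simp only [List.getElem?_modify]
  by_cases h : i = k <;> simp [h] <;> rfl

-- hoist a foldl of modifies at one fixed index into a single modify
theorem pvHoist {α : Type} (i : Nat) (cs : List Int) (F : Int → α → α) (m : List α) :
    cs.foldl (fun m j => m.modify i (F j)) m
      = m.modify i (fun x => cs.foldl (fun x j => F j x) x) := by
  induction cs generalizing m with
  | nil =>
    apply Eq.symm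
    apply List.ext_getElem?
    intro k
    rw [List.getElem?_modify]
    split <;> simp
  | cons c cs ih => simp only [List.foldl_cons, ih, pvModifyModify]

-- getElem? after a foldl of modifies at distinct nonnegative indices
theorem pvGetFoldl {α : Type} (is : List Int) (g : α → α)
    (hnn : ∀ i ∈ is, (0 : Int) ≤ i) (hnd : is.Nodup) (m : List α) (k : Nat) :
    (is.foldl (fun m i => m.modify i.toNat g) m)[k]? =
      if (k : Int) ∈ is then m[k]?.map g else m[k]? := by
  induction is generalizing m with
  | nil => simp
  | cons a as ih =>
    simp only [List.foldl_cons]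
    rw [ih (fun i hi => hnn i (List.mem_cons_of_mem _ hi)) hnd.of_cons]
    have ha : (0 : Int) ≤ a := hnn a (List.mem_cons_self ..)
    by_cases hak : a = (k : Int)
    · have hk : a.toNat = k := by omega
      have hknot : (k : Int) ∉ as := by
        intro hmem; exact (List.nodup_cons.mp hnd).1 (hak ▸ hmem)
      simp [hknot, hak]
    · have hk : a.toNat ≠ k := by omega
      simp only [List.getElem?_modify, if_neg hk]
      by_cases hmem : (k : Int) ∈ as <;> simp [hmem, List.mem_cons, Ne.symm hak]

-- getElem? through one corner pass
theorem pvGetPass (n a b c d : Int) (m : List (List Int))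
    (hb : ∀ i ∈ PySem.List.pyRange a b 1, (0 : Int) ≤ i) (k : Nat) :
    (pvPass n a b c d m)[k]? =
      if (k : Int) ∈ PySem.List.pyRange a b 1 then
        m[k]?.map (fun row =>
          (PySem.List.pyRange c d 1).foldl
            (fun r j => r.modify j.toNat (fun v => n * n + 1 - v)) row)
      else m[k]? := by
  unfold pvPass pvFlipAt
  simp only [pvHoist]
  exact pvGetFoldl _ _ hb (PySem.List.nodup_pyRange_one a b) m k

-- A equals the cell-by-cell middle form
theorem pvAEq (n : Int) : func_py_generate_doubly_even_magic_square n = pvComp n := by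
  simp only [func_py_generate_doubly_even_magic_square, pvComp]
  have h4 : (0:Int) < 4 := by norm_num
  have hq : PySem.Int.floordiv n 4 = n / 4 := PySem.Int.floordiv_eq_ediv_of_pos h4
  have ht : PySem.Int.floordiv (3 * n) 4 = 3 * n / 4 := PySem.Int.floordiv_eq_ediv_of_pos h4
  simp only [hq, ht]
  have hb1 : ∀ i ∈ PySem.List.pyRange 0 (n / 4) 1, (0 : Int) ≤ i := by
    intro i hi; rw [PySem.List.mem_pyRange_one] at hi; omega
  have hb2 : ∀ i ∈ PySem.List.pyRange (3 * n / 4) n 1, (0 : Int) ≤ i := by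
    intro i hi; rw [PySem.List.mem_pyRange_one] at hi; omega
  apply List.ext_getElem?
  intro k
  rw [pvGetPass n _ _ _ _ _ hb2 k, pvGetPass n _ _ _ _ _ hb2 k,
      pvGetPass n _ _ _ _ _ hb1 k, pvGetPass n _ _ _ _ _ hb1 k]
  simp only [PySem.List.mem_pyRange_one, List.getElem?_map, PySem.List.getElem?_pyRange_one]
  by_cases hk : (k : Int) < n
  · have hlen : k < (n - 0).toNat := by omega
    by_cases hcq : (k:Int) < n / 4
    · -- rows pass 1 & 2 hit, passes 3 & 4 miss
      have hct : ¬ (3 * n / 4 ≤ (k:Int)) := by omega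
      simp [hcq, hct, hk, hlen]
      apply List.ext_getElem?
      intro j
      rw [pvGetFoldl _ _ hb2 (PySem.List.nodup_pyRange_one _ _),
          pvGetFoldl _ _ hb1 (PySem.List.nodup_pyRange_one _ _)]
      simp only [PySem.List.mem_pyRange_one, List.getElem?_map, PySem.List.getElem?_pyRange_one]
      by_cases hj : j < (n - 0).toNat
      · simp [hj]
        split_ifs <;> (try simp) <;> first | rfl | (exfalso; omega) | ring1
      · have hj1 : ¬ ((j:Int) < n) := by omega
        have hj3 : ¬ (3 * n / 4 ≤ (j:Int) ∧ (j:Int) < n) := by omega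
        have hj4 : ¬ ((j:Int) < n / 4) := by omega
        simp [hj1, hj3, hj4]
    · by_cases hct : 3 * n / 4 ≤ (k:Int)
      · -- rows pass 3 & 4 hit, passes 1 & 2 miss
        simp [hcq, hct, hk, hlen]
        apply List.ext_getElem?
        intro j
        rw [pvGetFoldl _ _ hb2 (PySem.List.nodup_pyRange_one _ _),
            pvGetFoldl _ _ hb1 (PySem.List.nodup_pyRange_one _ _)]
        simp only [PySem.List.mem_pyRange_one, List.getElem?_map, PySem.List.getElem?_pyRange_one]
        by_cases hj : j < (n - 0).toNat
        · simp [hj]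
          split_ifs <;> (try simp) <;> first | rfl | (exfalso; omega) | ring1
        · have hj1 : ¬ ((j:Int) < n) := by omega
          have hj3 : ¬ (3 * n / 4 ≤ (j:Int) ∧ (j:Int) < n) := by omega
          have hj4 : ¬ ((j:Int) < n / 4) := by omega
          simp [hj1, hj3, hj4]
      · -- middle rows: no pass touches this row
        simp [hcq, hct, hk, hlen]
  · have h0 : ¬ ((k:Int) < n / 4) := by omega
    have h3 : ¬ (3 * n / 4 ≤ (k:Int) ∧ (k:Int) < n) := by omega
    have hlen : ¬ k < (n - 0).toNat := by omega
    simp [h0, h3, hk, hlen]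

-- B equals the cell-by-cell middle form
theorem pvBEq (n : Int) : func_py_generate_doubly_even_magic_square_alt n = pvComp n := by
  simp only [func_py_generate_doubly_even_magic_square_alt, pvComp]
  have h4 : (0:Int) < 4 := by norm_num
  rw [PySem.Int.floordiv_eq_ediv_of_pos h4, PySem.Int.floordiv_eq_ediv_of_pos h4,
      PySem.List.foldl_append_singleton_eq_map, List.nil_append]
  apply List.map_congr_left
  intro i hi
  rw [PySem.List.mem_pyRange_one] at hi
  have h0q : (0:Int) ≤ n / 4 := by omega
  have hqt : n / 4 ≤ 3 * n / 4 := by omega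
  have htn : 3 * n / 4 ≤ n := by omega
  by_cases hc : i < n / 4 ∨ 3 * n / 4 ≤ i
  · rw [if_pos hc]
    have hs1 : PySem.List.slice (PySem.List.pyRange (n*n - n*i) (n*n - n*i - n) (-1)) none (some (n/4))
        = (PySem.List.pyRange 0 (n/4) 1).map (fun j =>
            if (i < n / 4 ∨ 3 * n / 4 ≤ i) ∧ (j < n / 4 ∨ 3 * n / 4 ≤ j) then
              n * n + 1 - (n * i + j + 1) else n * i + j + 1) := by
      rw [PySem.List.slice_to _ h0q, PySem.List.pyRange_neg_one, PySem.List.pyRange_one]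
      have eA : (n*n - n*i) - (n*n - n*i - n) = n := by ring
      rw [eA]
      apply List.ext_getElem
      · simp; omega
      · intro k h1 h2
        simp at h1 h2 ⊢
        rw [if_pos ⟨hc, Or.inl (by omega)⟩]
        ring
    have hs2 : PySem.List.slice (PySem.List.pyRange (n*i + 1) (n*i + n + 1) 1) (some (n/4)) (some (3*n/4))
        = (PySem.List.pyRange (n/4) (3*n/4) 1).map (fun j =>
            if (i < n / 4 ∨ 3 * n / 4 ≤ i) ∧ (j < n / 4 ∨ 3 * n / 4 ≤ j) then
              n * n + 1 - (n * i + j + 1) else n * i + j + 1) := by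
      rw [PySem.List.slice_toNat _ h0q (by omega), PySem.List.pyRange_one, PySem.List.pyRange_one]
      have eB : (n*i + n + 1) - (n*i + 1) = n := by ring
      rw [eB]
      apply List.ext_getElem
      · simp; omega
      · intro k h1 h2
        simp at h1 h2 ⊢
        rw [if_neg (by rintro ⟨-, hj⟩; rcases hj with hj | hj <;> omega)]
        omega
    have hs3 : PySem.List.slice (PySem.List.pyRange (n*n - n*i) (n*n - n*i - n) (-1)) (some (3*n/4)) none
        = (PySem.List.pyRange (3*n/4) n 1).map (fun j =>
            if (i < n / 4 ∨ 3 * n / 4 ≤ i) ∧ (j < n / 4 ∨ 3 * n / 4 ≤ j) then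
              n * n + 1 - (n * i + j + 1) else n * i + j + 1) := by
      have ht0 : (0:Int) ≤ 3*n/4 := by omega
      rw [PySem.List.slice_from _ ht0, PySem.List.pyRange_neg_one, PySem.List.pyRange_one]
      have eA : (n*n - n*i) - (n*n - n*i - n) = n := by ring
      rw [eA]
      apply List.ext_getElem
      · simp; omega
      · intro k h1 h2
        simp only [List.getElem_drop, List.getElem_map, List.getElem_range]
        rw [if_pos ⟨hc, Or.inr (by omega)⟩]
        push_cast [Int.toNat_of_nonneg ht0]
        ring
    rw [hs1, hs2, hs3, PySem.List.pyRange_one_append 0 (3*n/4) n (by omega) htn,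
        PySem.List.pyRange_one_append 0 (n/4) (3*n/4) h0q hqt, List.map_append, List.map_append,
        List.append_assoc]
  · rw [if_neg hc, PySem.List.pyRange_one, PySem.List.pyRange_one]
    have eB : (n*i + n + 1) - (n*i + 1) = n := by ring
    rw [eB]
    apply List.ext_getElem
    · simp
    · intro k h1 h2
      simp at h1 h2 ⊢
      rw [if_neg (by tauto)]
      ring

-- ===== VERDICT (by name: the statement is the Claim_ definition above) =====
theorem func_py_generate_doubly_even_magic_square_spec : Claim_equal_func_py_generate_doubly_even_magic_square := by
  intro n _
  unfold Spec_func_py_generate_doubly_even_magic_square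
  rw [pvAEq, pvBEq]
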